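-- pv_equiv track=rewrite | github.com/alcayagadaniel/validacion-nomina-streamlit | app.py | calcular_meses_previos
-- ===== SOURCE A (Python) =====
-- def calcular_meses_previos(mes: int, anno: int, n: int):
--     meses = []
--     m = mes
--     y = anno
--     for _ in range(n):
--         m -= 1
--         if m == 0:
--             m = 12
--             y -= 1
--         meses.append((m, y))
--     return list(reversed(meses))
-- ===== SOURCE B (Python) =====
-- def calcular_meses_previos(mes: int, anno: int, n: int):
--     res = []
--     for k in range(n, 0, -1):
--         # year borrows accumulated over k backward steps (only once the month passes January)
--         w = (k - mes) // 12 + 1 if 1 <= mes <= k else 0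
--         res.append((mes - k + 12 * w, anno - w))
--     return res
-- ===== Notes on version B (the rewrite author's own statement) =====
-- stated objective: alternative
-- what changed: Replaces the month-by-month decrement-and-wrap loop plus final reversal by a closed-form borrow count per entry ((k-mes)//12+1 year borrows once the month passes January), emitting the pairs oldest-first directly.
import Mathlib
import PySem

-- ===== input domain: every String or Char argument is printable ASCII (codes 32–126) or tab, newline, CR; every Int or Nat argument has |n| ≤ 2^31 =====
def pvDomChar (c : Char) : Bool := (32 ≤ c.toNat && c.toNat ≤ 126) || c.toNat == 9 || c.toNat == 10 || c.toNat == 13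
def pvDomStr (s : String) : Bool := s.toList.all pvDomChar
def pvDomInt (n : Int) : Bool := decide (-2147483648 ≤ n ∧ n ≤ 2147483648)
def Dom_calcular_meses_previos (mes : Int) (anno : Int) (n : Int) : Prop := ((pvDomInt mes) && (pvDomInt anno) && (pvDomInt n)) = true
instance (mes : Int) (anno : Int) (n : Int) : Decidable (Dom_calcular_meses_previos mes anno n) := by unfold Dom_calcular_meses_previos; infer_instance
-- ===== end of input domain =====

-- B replaces A's decrement-and-wrap loop plus final reversal by a closed-form
-- per-entry borrow count, emitting the pairs oldest-first (objective: alternative).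


-- ===== PORT A =====
def calcular_meses_previos (mes : Int) (anno : Int) (n : Int) : List (Int × Int) :=
  let st := (PySem.List.pyRange 0 n 1).foldl
    (fun (st : Int × Int × List (Int × Int)) _ =>
      let m := st.1 - 1
      if m == 0 then (12, st.2.1 - 1, st.2.2 ++ [(12, st.2.1 - 1)])
      else (m, st.2.1, st.2.2 ++ [(m, st.2.1)]))
    (mes, anno, [])
  st.2.2.reverse

-- ===== PORT B =====
def calcular_meses_previos_alt (mes : Int) (anno : Int) (n : Int) : List (Int × Int) :=
  (PySem.List.pyRange n 0 (-1)).map (fun k =>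
    let w := if 1 ≤ mes ∧ mes ≤ k then PySem.Int.floordiv (k - mes) 12 + 1 else 0
    (mes - k + 12 * w, anno - w))

-- ===== PRECONDITION & SPEC =====
def Spec_calcular_meses_previos (mes : Int) (anno : Int) (n : Int) (out : List (Int × Int)) : Prop := out = calcular_meses_previos_alt mes anno n
instance (mes : Int) (anno : Int) (n : Int) (out : List (Int × Int)) : Decidable (Spec_calcular_meses_previos mes anno n out) := by unfold Spec_calcular_meses_previos; infer_instance

-- ===== CLAIM (what is proved, stated in full; the proofs are below) =====
def Claim_equal_calcular_meses_previos : Prop := ∀ (mes : Int) (anno : Int) (n : Int), Dom_calcular_meses_previos mes anno n → Spec_calcular_meses_previos mes anno n (calcular_meses_previos mes anno n)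

-- ===== LEMMAS AND PROOFS =====

-- the month/year pair k steps before (mes, anno), by A's non-normalizing rule
def pvPair (mes anno k : Int) : Int × Int :=
  let w := if 1 ≤ mes ∧ mes ≤ k then (k - mes) / 12 + 1 else 0
  (mes - k + 12 * w, anno - w)

def pvStep (st : Int × Int × List (Int × Int)) : Int × Int × List (Int × Int) :=
  let m := st.1 - 1
  if m == 0 then (12, st.2.1 - 1, st.2.2 ++ [(12, st.2.1 - 1)])
  else (m, st.2.1, st.2.2 ++ [(m, st.2.1)])

theorem pvStep_pair (mes anno : Int) (j : Int) (hj : 0 ≤ j) (acc : List (Int × Int)) :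
    pvStep ((pvPair mes anno j).1, (pvPair mes anno j).2, acc)
      = ((pvPair mes anno (j+1)).1, (pvPair mes anno (j+1)).2, acc ++ [pvPair mes anno (j+1)]) := by
  simp only [pvStep, pvPair, beq_iff_eq]
  by_cases h1 : 1 ≤ mes ∧ mes ≤ j <;> by_cases h2 : 1 ≤ mes ∧ mes ≤ j + 1
  · simp only [if_pos h1, if_pos h2]
    split_ifs with h <;>
      simp only [Prod.mk.injEq, List.append_cancel_left_eq, List.cons.injEq, and_true] <;>
      and_intros <;> first | trivial | omega
  · exact absurd ⟨h1.1, by omega⟩ h2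
  · simp only [if_neg h1, if_pos h2]
    split_ifs with h <;>
      simp only [Prod.mk.injEq, List.append_cancel_left_eq, List.cons.injEq, and_true] <;>
      and_intros <;> first | trivial | omega
  · simp only [if_neg h1, if_neg h2]
    split_ifs with h <;>
      simp only [Prod.mk.injEq, List.append_cancel_left_eq, List.cons.injEq, and_true] <;>
      and_intros <;> first | trivial | omega

theorem pv_fold_inv (mes anno : Int) (N : Nat) :
    (List.range N).foldl (fun st _ => pvStep st) (mes, anno, ([] : List (Int × Int)))
      = ((pvPair mes anno (N : Int)).1, (pvPair mes anno (N : Int)).2,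
          (List.range N).map (fun k : Nat => pvPair mes anno ((k : Int) + 1))) := by
  induction N with
  | zero =>
    simp only [List.range_zero, List.foldl_nil, List.map_nil, pvPair, Nat.cast_zero]
    have : ¬ (1 ≤ mes ∧ mes ≤ (0:Int)) ∨ (1 ≤ mes ∧ mes ≤ (0:Int)) := by tauto
    split_ifs with h
    · omega
    · simp
  | succ N ih =>
    rw [List.range_succ, List.foldl_append, ih, List.foldl_cons, List.foldl_nil,
        List.map_append]
    rw [pvStep_pair mes anno (N : Int) (by positivity)
        ((List.range N).map (fun k : Nat => pvPair mes anno ((k : Int) + 1)))]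
    push_cast
    simp

-- ===== VERDICT (by name: the statement is the Claim_ definition above) =====
theorem calcular_meses_previos_spec : Claim_equal_calcular_meses_previos := by
  intro mes anno n _
  unfold Spec_calcular_meses_previos calcular_meses_previos calcular_meses_previos_alt
  have hfold :
      (PySem.List.pyRange 0 n 1).foldl
        (fun (st : Int × Int × List (Int × Int)) _ =>
          let m := st.1 - 1
          if m == 0 then (12, st.2.1 - 1, st.2.2 ++ [(12, st.2.1 - 1)])
          else (m, st.2.1, st.2.2 ++ [(m, st.2.1)]))
        (mes, anno, [])
      = ((pvPair mes anno (n.toNat : Int)).1, (pvPair mes anno (n.toNat : Int)).2,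
          (List.range n.toNat).map (fun k : Nat => pvPair mes anno ((k : Int) + 1))) := by
    rw [PySem.List.pyRange_one, List.foldl_map]
    have := pv_fold_inv mes anno ((n - 0).toNat)
    simpa [pvStep] using this
  rw [hfold, PySem.List.pyRange_neg_one, List.map_map]
  apply List.ext_getElem
  · simp
  · intro i hi1 hi2
    have hi : i < n.toNat := by simpa using hi1
    rw [List.getElem_reverse]
    simp only [List.getElem_map, List.getElem_range, List.length_map, List.length_range,
      Function.comp_apply]
    show pvPair mes anno (((n.toNat - 1 - i : Nat) : Int) + 1)
        = (let w := if 1 ≤ mes ∧ mes ≤ n - (i : Int)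
                    then PySem.Int.floordiv (n - (i : Int) - mes) 12 + 1 else 0
           (mes - (n - (i : Int)) + 12 * w, anno - w))
    have harg : ((n.toNat - 1 - i : Nat) : Int) + 1 = n - (i : Int) := by omega
    rw [harg]
    simp only [pvPair,
      PySem.Int.floordiv_eq_ediv_of_pos (by norm_num : (0:Int) < 12)]
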